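-- pv_equiv track=rewrite | github.com/adriablancafort/problemes-ap2 | grafs/treasures_in_map_5.py | bfs
-- ===== SOURCE A (Python) =====
-- from typing import List, Tuple
-- from collections import deque
--
-- def bfs(map: List[List[str]], x: int, y: int) -> int:
--     dx = [-1, 0, 1, 0]
--     dy = [0, 1, 0, -1]
--     queue = deque([(x, y, 0)])
--     visited = [[False] * len(map[0]) for _ in range(len(map))]
--     distances = []
--     while queue:
--         x, y, steps = queue.popleft()
--         if map[x][y] == 't':
--             distances.append(steps)
--         for i in range(4):
--             nx, ny = x + dx[i], y + dy[i]
--             if nx >= 0 and ny >= 0 and nx < len(map) and ny < len(map[0]) and not visited[nx][ny] and map[nx][ny] != 'X':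
--                 visited[nx][ny] = True
--                 queue.append((nx, ny, steps + 1))
--     distances.sort(reverse=True)
--     return distances[1] if len(distances) > 1 else -1
-- ===== SOURCE B (Python) =====
-- def bfs(map, x, y):
--     rows, cols = len(map), len(map[0])
--     visited = [[False] * cols for _ in range(rows)]
--     distances = []
--     frontier = [(x, y)]
--     level = 0
--     while frontier:
--         nxt = []
--         for cx, cy in frontier:
--             if map[cx][cy] == 't':
--                 distances.append(level)
--             for nx, ny in ((cx - 1, cy), (cx, cy + 1), (cx + 1, cy), (cx, cy - 1)):
--                 if 0 <= nx < rows and 0 <= ny < cols and not visited[nx][ny] and map[nx][ny] != 'X':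
--                     visited[nx][ny] = True
--                     nxt.append((nx, ny))
--         frontier = nxt
--         level += 1
--     distances.sort(reverse=True)
--     return distances[1] if len(distances) > 1 else -1
-- ===== Notes on version B (the rewrite author's own statement) =====
-- stated objective: alternative
-- what changed: Replaces the deque of (x,y,steps) triples popped one at a time by a level-order BFS: a plain-list frontier of coordinate pairs is swept wave by wave with an integer level counter, so no per-cell step counter or deque is needed; sort-and-select of the distances is unchanged.
-- outside the precondition, e.g. on bfs([['t'], ['t']], -1, 0): A returns 1, B returns 1; on bfs([['.'], ['.', 't'], ['t']], 0, 0): A returns -1, B returns -1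
import Mathlib
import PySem

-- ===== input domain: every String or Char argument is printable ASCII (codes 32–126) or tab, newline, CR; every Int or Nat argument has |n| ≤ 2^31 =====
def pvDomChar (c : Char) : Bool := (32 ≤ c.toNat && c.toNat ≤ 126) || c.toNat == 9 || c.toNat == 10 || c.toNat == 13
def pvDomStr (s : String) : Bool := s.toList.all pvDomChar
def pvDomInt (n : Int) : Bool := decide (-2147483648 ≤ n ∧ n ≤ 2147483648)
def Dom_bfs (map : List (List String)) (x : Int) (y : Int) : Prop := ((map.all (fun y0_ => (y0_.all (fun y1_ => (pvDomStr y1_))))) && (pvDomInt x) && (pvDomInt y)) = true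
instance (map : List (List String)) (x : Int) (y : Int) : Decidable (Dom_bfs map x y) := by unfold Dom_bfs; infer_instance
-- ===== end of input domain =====

-- B replaces A's deque of (x,y,steps) triples by a level-order BFS over plain-list frontiers with a level
-- counter (alternative decomposition, same cost); same visited-on-enqueue policy, same sort-and-select.

-- shared grid helpers (exact for the in-range, non-negative indices that all accesses under Pre_ use)
def cellGet (m : List (List String)) (i j : Int) : String :=
  (m.getD i.toNat []).getD j.toNat ""

def visGet (v : List (List Bool)) (i j : Int) : Bool :=
  (v.getD i.toNat []).getD j.toNat false

def visSet (v : List (List Bool)) (i j : Int) : List (List Bool) :=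
  v.set i.toNat ((v.getD i.toNat []).set j.toNat true)

-- number of unvisited cells: termination measure for both BFS loops
def unvis (v : List (List Bool)) : Nat := (v.map (fun r => r.count false)).sum

-- the visited matrix keeps the map's shape
def ShapeOK (m : List (List String)) (v : List (List Bool)) : Prop :=
  v.length = m.length ∧ ∀ r ∈ v, r.length = (m.getD 0 []).length

theorem unvis_cons (a : List Bool) (t : List (List Bool)) :
    unvis (a :: t) = a.count false + unvis t := by simp [unvis]

theorem count_false_set_true (r : List Bool) (k : Nat) :
    (r.set k true).count false + (if r.getD k true = false then 1 else 0) = r.count false := by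
  induction r generalizing k with
  | nil => simp
  | cons b t ih =>
    cases k with
    | zero => cases b <;> simp [List.count_cons]
    | succ k' =>
      have ih' := ih k'
      rw [List.set_cons_succ, List.getD_cons_succ, List.count_cons, List.count_cons]
      omega

theorem unvis_set (v : List (List Bool)) (n : Nat) (r' : List Bool) (h : n < v.length) :
    unvis (v.set n r') + (v.getD n []).count false = unvis v + r'.count false := by
  induction v generalizing n with
  | nil => simp at h
  | cons a t ih =>
    cases n with
    | zero => simp [unvis_cons]; omega
    | succ k =>
      have hk : k < t.length := by simpa using h
      have := ih k hk
      simp [unvis_cons, List.getD] at *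
      omega

theorem shape_unvis_mark (m : List (List String)) (v : List (List Bool)) (i j : Int)
    (hv : ShapeOK m v) (hi0 : 0 ≤ i) (hiR : i < (m.length : Int)) (hj0 : 0 ≤ j)
    (hjC : j < ((m.getD 0 []).length : Int)) (hfalse : visGet v i j = false) :
    ShapeOK m (visSet v i j) ∧ unvis (visSet v i j) + 1 ≤ unvis v := by
  obtain ⟨hlen, hrows⟩ := hv
  have hiv : i.toNat < v.length := by omega
  have hrmem : v.getD i.toNat [] ∈ v := by
    rw [List.getD_eq_getElem v [] hiv]; exact List.getElem_mem hiv
  have hrlen : (v.getD i.toNat []).length = (m.getD 0 []).length := hrows _ hrmem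
  have hjr : j.toNat < (v.getD i.toNat []).length := by omega
  refine ⟨⟨by simpa [visSet] using hlen, ?_⟩, ?_⟩
  · intro row hrow
    rcases List.mem_or_eq_of_mem_set hrow with h | h
    · exact hrows _ h
    · rw [h]; simpa using hrlen
  · have hset := unvis_set v i.toNat ((v.getD i.toNat []).set j.toNat true) hiv
    have hcnt := count_false_set_true (v.getD i.toNat []) j.toNat
    have hf : (v.getD i.toNat []).getD j.toNat true = false := by
      rw [List.getD_eq_getElem _ true hjr]
      unfold visGet at hfalse
      rwa [List.getD_eq_getElem _ false hjr] at hfalse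
    rw [hf, if_pos rfl] at hcnt
    unfold visSet
    omega

-- ===== PORT A =====
def dirsA : List (Int × Int) := [(-1, 0), (0, 1), (1, 0), (0, -1)]

def stepA (m : List (List String)) (x y steps : Int)
    (vq : List (List Bool) × List (Int × Int × Int)) (d : Int × Int) :
    List (List Bool) × List (Int × Int × Int) :=
  let nx := x + d.1
  let ny := y + d.2
  if 0 ≤ nx ∧ 0 ≤ ny ∧ nx < (m.length : Int) ∧ ny < ((m.getD 0 []).length : Int) ∧
      visGet vq.1 nx ny = false ∧ cellGet m nx ny ≠ "X"
  then (visSet vq.1 nx ny, vq.2 ++ [(nx, ny, steps + 1)])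
  else vq

theorem foldA_inv (m : List (List String)) (x y s : Int) (ds : List (Int × Int)) :
    ∀ (v : List (List Bool)) (q : List (Int × Int × Int)), ShapeOK m v →
      ShapeOK m (ds.foldl (stepA m x y s) (v, q)).1 ∧
      (ds.foldl (stepA m x y s) (v, q)).2.length + unvis (ds.foldl (stepA m x y s) (v, q)).1 ≤
        q.length + unvis v ∧
      q.length ≤ (ds.foldl (stepA m x y s) (v, q)).2.length := by
  induction ds with
  | nil => intro v q h; exact ⟨h, le_refl _, le_refl _⟩
  | cons d0 ds ih =>
    intro v q h
    rcases hE : stepA m x y s (v, q) d0 with ⟨v1, q1⟩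
    have hstep : ShapeOK m v1 ∧ q1.length + unvis v1 ≤ q.length + unvis v ∧
        q.length ≤ q1.length := by
      simp only [stepA] at hE
      split_ifs at hE with hg
      · obtain ⟨h1, h2, h3, h4, h5, _⟩ := hg
        obtain ⟨hs, hu⟩ := shape_unvis_mark m v (x + d0.1) (y + d0.2) h h1 h3 h2 h4 h5
        injection hE with hv1 hq1
        subst hv1 hq1
        exact ⟨hs, by simp; omega, by simp⟩
      · injection hE with hv1 hq1
        subst hv1 hq1
        exact ⟨h, le_refl _, le_refl _⟩
    have ihh := ih v1 q1 hstep.1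
    rw [List.foldl_cons, hE]
    exact ⟨ihh.1, by omega, by omega⟩

def runA (m : List (List String)) (q : List (Int × Int × Int)) (v : List (List Bool))
    (hv : ShapeOK m v) (d : List Int) : List Int :=
  match q with
  | [] => d
  | (cx, cy, steps) :: q' =>
    let d' := if cellGet m cx cy = "t" then d ++ [steps] else d
    runA m (dirsA.foldl (stepA m cx cy steps) (v, q')).2
      (dirsA.foldl (stepA m cx cy steps) (v, q')).1
      (foldA_inv m cx cy steps dirsA v q' hv).1 d'
termination_by q.length + 2 * unvis v
decreasing_by
  have h := foldA_inv m cx cy steps dirsA v q' hv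
  simp only [List.length_cons]
  omega

def bfs (map : List (List String)) (x : Int) (y : Int) : Int :=
  let distances := runA map [(x, y, 0)]
    (List.replicate map.length (List.replicate (map.getD 0 []).length false))
    ⟨by simp, fun r hr => by rw [List.eq_of_mem_replicate hr]; simp⟩ []
  let ds := PySem.List.sorted distances (fun z => z) true
  if 1 < ds.length then ds.getD 1 0 else -1

-- ===== PORT B =====
def nbrs (cx cy : Int) : List (Int × Int) := [(cx - 1, cy), (cx, cy + 1), (cx + 1, cy), (cx, cy - 1)]

def stepB (m : List (List String)) (vn : List (List Bool) × List (Int × Int)) (c : Int × Int) :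
    List (List Bool) × List (Int × Int) :=
  if 0 ≤ c.1 ∧ c.1 < (m.length : Int) ∧ 0 ≤ c.2 ∧ c.2 < ((m.getD 0 []).length : Int) ∧
      visGet vn.1 c.1 c.2 = false ∧ cellGet m c.1 c.2 ≠ "X"
  then (visSet vn.1 c.1 c.2, vn.2 ++ [c])
  else vn

def cellStepB (m : List (List String)) (level : Int)
    (st : List Int × List (List Bool) × List (Int × Int)) (c : Int × Int) :
    List Int × List (List Bool) × List (Int × Int) :=
  let d1 := if cellGet m c.1 c.2 = "t" then st.1 ++ [level] else st.1
  let vn := (nbrs c.1 c.2).foldl (stepB m) st.2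
  (d1, vn.1, vn.2)

theorem foldB_inv (m : List (List String)) (cs : List (Int × Int)) :
    ∀ (v : List (List Bool)) (nx : List (Int × Int)), ShapeOK m v →
      ShapeOK m (cs.foldl (stepB m) (v, nx)).1 ∧
      (cs.foldl (stepB m) (v, nx)).2.length + unvis (cs.foldl (stepB m) (v, nx)).1 ≤
        nx.length + unvis v := by
  induction cs with
  | nil => intro v nx h; exact ⟨h, le_refl _⟩
  | cons c cs ih =>
    intro v nx h
    rcases hE : stepB m (v, nx) c with ⟨v1, n1⟩
    have hstep : ShapeOK m v1 ∧ n1.length + unvis v1 ≤ nx.length + unvis v := by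
      simp only [stepB] at hE
      split_ifs at hE with hg
      · obtain ⟨h1, h2, h3, h4, h5, _⟩ := hg
        obtain ⟨hs, hu⟩ := shape_unvis_mark m v c.1 c.2 h h1 h2 h3 h4 h5
        injection hE with hv1 hn1
        subst hv1 hn1
        exact ⟨hs, by simp; omega⟩
      · injection hE with hv1 hn1
        subst hv1 hn1
        exact ⟨h, le_refl _⟩
    have ihh := ih v1 n1 hstep.1
    rw [List.foldl_cons, hE]
    exact ⟨ihh.1, by omega⟩

theorem foldLevel_inv (m : List (List String)) (level : Int) (fs : List (Int × Int)) :
    ∀ (dl : List Int) (v : List (List Bool)) (nx : List (Int × Int)), ShapeOK m v →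
      ShapeOK m (fs.foldl (cellStepB m level) (dl, v, nx)).2.1 ∧
      (fs.foldl (cellStepB m level) (dl, v, nx)).2.2.length +
          unvis (fs.foldl (cellStepB m level) (dl, v, nx)).2.1 ≤
        nx.length + unvis v := by
  induction fs with
  | nil => intro dl v nx h; exact ⟨h, le_refl _⟩
  | cons c fs ih =>
    intro dl v nx h
    have hstep := foldB_inv m (nbrs c.1 c.2) v nx h
    rcases hE : (nbrs c.1 c.2).foldl (stepB m) (v, nx) with ⟨v1, n1⟩
    rw [hE] at hstep
    simp only [] at hstep
    have hc : cellStepB m level (dl, v, nx) c =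
        ((if cellGet m c.1 c.2 = "t" then dl ++ [level] else dl), v1, n1) := by
      simp only [cellStepB]
      rw [hE]
    have ihh := ih (if cellGet m c.1 c.2 = "t" then dl ++ [level] else dl) v1 n1 hstep.1
    rw [List.foldl_cons, hc]
    exact ⟨ihh.1, by omega⟩

def runB (m : List (List String)) (frontier : List (Int × Int)) (level : Int)
    (v : List (List Bool)) (hv : ShapeOK m v) (d : List Int) : List Int :=
  match frontier with
  | [] => d
  | c :: fr =>
    runB m ((c :: fr).foldl (cellStepB m level) (d, v, [])).2.2 (level + 1)
      ((c :: fr).foldl (cellStepB m level) (d, v, [])).2.1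
      (foldLevel_inv m level (c :: fr) d v [] hv).1
      ((c :: fr).foldl (cellStepB m level) (d, v, [])).1
termination_by frontier.length + 2 * unvis v
decreasing_by
  have h := (foldLevel_inv m level (c :: fr) d v [] hv).2
  simp only [List.length_nil] at h
  simp only [List.length_cons]
  omega

def bfs_alt (map : List (List String)) (x : Int) (y : Int) : Int :=
  let distances := runB map [(x, y)] 0
    (List.replicate map.length (List.replicate (map.getD 0 []).length false))
    ⟨by simp, fun r hr => by rw [List.eq_of_mem_replicate hr]; simp⟩ []
  let ds := PySem.List.sorted distances (fun z => z) true
  if 1 < ds.length then ds.getD 1 0 else -1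

-- ===== PRECONDITION & SPEC =====
-- Pre_ is the natural grid domain: a non-empty rectangular map and an in-range start. It excludes the
-- inputs where Python A raises (empty map, out-of-range start, ragged rows hit mid-BFS) and, as stated
-- in the claim's cites, a few inputs A still returns on only via Python indexing outside the grid
-- abstraction (negative-index wraparound starts, ragged maps the BFS happens not to fault on).
def Pre_bfs (map : List (List String)) (x : Int) (y : Int) : Prop :=
  map ≠ [] ∧ (∀ r ∈ map, r.length = (map.getD 0 []).length) ∧
    0 ≤ x ∧ x < (map.length : Int) ∧ 0 ≤ y ∧ y < ((map.getD 0 []).length : Int)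
instance (map : List (List String)) (x : Int) (y : Int) : Decidable (Pre_bfs map x y) := by
  unfold Pre_bfs; infer_instance

def pvWitness_bfs : List (List String) × Int × Int := ([["t", "."], [".", "t"]], 0, 0)

def Spec_bfs (map : List (List String)) (x : Int) (y : Int) (out : Int) : Prop := out = bfs_alt map x y
instance (map : List (List String)) (x : Int) (y : Int) (out : Int) : Decidable (Spec_bfs map x y out) := by unfold Spec_bfs; infer_instance

-- ===== CLAIM (what is proved, stated in full; the proofs are below) =====
def Claim_equal_bfs : Prop := ∀ (map : List (List String)) (x : Int) (y : Int), Dom_bfs map x y → Pre_bfs map x y → Spec_bfs map x y (bfs map x y)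

-- ===== LEMMAS AND PROOFS =====
theorem runA_nil (m : List (List String)) (v : List (List Bool)) (hv : ShapeOK m v) (d : List Int) :
    runA m [] v hv d = d := by rw [runA.eq_def]

theorem runB_nil (m : List (List String)) (level : Int) (v : List (List Bool))
    (hv : ShapeOK m v) (d : List Int) : runB m [] level v hv d = d := by rw [runB.eq_def]

theorem runA_congr (m : List (List String)) {q1 q2 : List (Int × Int × Int)}
    {v1 v2 : List (List Bool)} {d1 d2 : List Int} (h1 : ShapeOK m v1) (h2 : ShapeOK m v2)
    (hq : q1 = q2) (hvv : v1 = v2) (hd : d1 = d2) : runA m q1 v1 h1 d1 = runA m q2 v2 h2 d2 := by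
  subst hq hvv hd; rfl

theorem runB_congr (m : List (List String)) {f1 f2 : List (Int × Int)} {l1 l2 : Int}
    {v1 v2 : List (List Bool)} {d1 d2 : List Int} (h1 : ShapeOK m v1) (h2 : ShapeOK m v2)
    (hf : f1 = f2) (hl : l1 = l2) (hvv : v1 = v2) (hd : d1 = d2) :
    runB m f1 l1 v1 h1 d1 = runB m f2 l2 v2 h2 d2 := by subst hf hl hvv hd; rfl

def tagL (s : Int) (F : List (Int × Int)) : List (Int × Int × Int) := F.map (fun c => (c.1, c.2, s))

theorem runA_cons (m : List (List String)) (cx cy steps : Int) (q' : List (Int × Int × Int))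
    (v : List (List Bool)) (hv : ShapeOK m v) (d : List Int) :
    runA m ((cx, cy, steps) :: q') v hv d =
      runA m (dirsA.foldl (stepA m cx cy steps) (v, q')).2
        (dirsA.foldl (stepA m cx cy steps) (v, q')).1
        (foldA_inv m cx cy steps dirsA v q' hv).1
        (if cellGet m cx cy = "t" then d ++ [steps] else d) := by
  rw [runA.eq_def]

theorem runB_cons (m : List (List String)) (c : Int × Int) (fr : List (Int × Int)) (level : Int)
    (v : List (List Bool)) (hv : ShapeOK m v) (d : List Int) :
    runB m (c :: fr) level v hv d =
      runB m ((c :: fr).foldl (cellStepB m level) (d, v, [])).2.2 (level + 1)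
        ((c :: fr).foldl (cellStepB m level) (d, v, [])).2.1
        (foldLevel_inv m level (c :: fr) d v [] hv).1
        ((c :: fr).foldl (cellStepB m level) (d, v, [])).1 := by
  rw [runB.eq_def]

theorem foldB_append (m : List (List String)) (cs : List (Int × Int)) :
    ∀ (v : List (List Bool)) (N M : List (Int × Int)),
      cs.foldl (stepB m) (v, N ++ M) =
        ((cs.foldl (stepB m) (v, M)).1, N ++ (cs.foldl (stepB m) (v, M)).2) := by
  induction cs with
  | nil => intro v N M; simp
  | cons c cs ih =>
    intro v N M
    have hstep : stepB m (v, N ++ M) c = ((stepB m (v, M) c).1, N ++ (stepB m (v, M) c).2) := by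
      simp only [stepB]
      split_ifs with hg <;> simp
    rw [List.foldl_cons, List.foldl_cons, hstep]
    rcases hE : stepB m (v, M) c with ⟨v1, M1⟩
    dsimp only
    exact ih v1 N M1

theorem stepAB (m : List (List String)) (x y s : Int) (v : List (List Bool))
    (q : List (Int × Int × Int)) (d0 : Int × Int) :
    stepA m x y s (v, q) d0 =
      ((stepB m (v, []) (x + d0.1, y + d0.2)).1,
       q ++ (stepB m (v, []) (x + d0.1, y + d0.2)).2.map (fun c => (c.1, c.2, s + 1))) := by
  simp only [stepA, stepB]
  split_ifs with h1 h2 h3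
  · simp
  · exact absurd ⟨h1.1, h1.2.2.1, h1.2.1, h1.2.2.2.1, h1.2.2.2.2.1, h1.2.2.2.2.2⟩ h2
  · exact absurd ⟨h3.1, h3.2.2.1, h3.2.1, h3.2.2.2.1, h3.2.2.2.2.1, h3.2.2.2.2.2⟩ h1
  · simp

theorem dirsA_map (x y : Int) :
    dirsA.map (fun d0 => (x + d0.1, y + d0.2)) = nbrs x y := by
  have h1 : x + (-1 : Int) = x - 1 := by ring
  have h2 : y + (-1 : Int) = y - 1 := by ring
  simp [dirsA, nbrs, h1, h2]

theorem foldAB (m : List (List String)) (x y s : Int) (ds : List (Int × Int)) :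
    ∀ (v : List (List Bool)) (q : List (Int × Int × Int)),
      ds.foldl (stepA m x y s) (v, q) =
        (((ds.map (fun d0 => (x + d0.1, y + d0.2))).foldl (stepB m) (v, [])).1,
         q ++ ((ds.map (fun d0 => (x + d0.1, y + d0.2))).foldl (stepB m) (v, [])).2.map
           (fun c => (c.1, c.2, s + 1))) := by
  induction ds with
  | nil => intro v q; simp
  | cons d0 ds ih =>
    intro v q
    rw [List.foldl_cons, stepAB]
    rcases hE : stepB m (v, []) (x + d0.1, y + d0.2) with ⟨v1, n1⟩
    dsimp only
    rw [ih v1 (q ++ n1.map (fun c => (c.1, c.2, s + 1)))]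
    rw [List.map_cons, List.foldl_cons, hE]
    have happ := foldB_append m (ds.map (fun d0 => (x + d0.1, y + d0.2))) v1 n1 []
    simp only [List.append_nil] at happ
    rw [happ]
    simp [List.map_append]

theorem bridge (m : List (List String)) :
    ∀ (k : Nat) (F N : List (Int × Int)) (s : Int) (v : List (List Bool)) (hv : ShapeOK m v)
      (d : List Int) (hst : ShapeOK m (F.foldl (cellStepB m s) (d, v, N)).2.1),
      2 * unvis v + F.length + 2 * N.length ≤ k →
      runA m (tagL s F ++ tagL (s + 1) N) v hv d =
        runB m (F.foldl (cellStepB m s) (d, v, N)).2.2 (s + 1)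
          (F.foldl (cellStepB m s) (d, v, N)).2.1 hst (F.foldl (cellStepB m s) (d, v, N)).1 := by
  intro k
  induction k with
  | zero =>
    intro F N s v hv d hst hk
    cases F with
    | cons c F' => simp at hk
    | nil =>
      cases N with
      | cons c N' => simp at hk
      | nil => simp [tagL, runA_nil, runB_nil]
  | succ k ih =>
    intro F N s v hv d hst hk
    cases F with
    | nil =>
      cases N with
      | nil => simp [tagL, runA_nil, runB_nil]
      | cons c N' =>
        have hst2 : ShapeOK m (((c :: N').foldl (cellStepB m (s + 1)) (d, v, [])).2.1) :=
          (foldLevel_inv m (s + 1) (c :: N') d v [] hv).1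
        have h2 := ih (c :: N') [] (s + 1) v hv d hst2 (by
          simp only [List.length_cons, List.length_nil] at hk ⊢; omega)
        calc runA m (tagL s [] ++ tagL (s + 1) (c :: N')) v hv d
            = runA m (tagL (s + 1) (c :: N') ++ tagL (s + 1 + 1) []) v hv d :=
              runA_congr m hv hv (by simp [tagL]) rfl rfl
          _ = runB m (((c :: N').foldl (cellStepB m (s + 1)) (d, v, [])).2.2) (s + 1 + 1)
                (((c :: N').foldl (cellStepB m (s + 1)) (d, v, [])).2.1) hst2
                (((c :: N').foldl (cellStepB m (s + 1)) (d, v, [])).1) := h2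
          _ = runB m (c :: N') (s + 1) v hst d := (runB_cons m c N' (s + 1) v hst d).symm
    | cons c F' =>
      rcases hp : (nbrs c.1 c.2).foldl (stepB m) (v, []) with ⟨v1, new⟩
      have hBinv := foldB_inv m (nbrs c.1 c.2) v [] hv
      rw [hp] at hBinv
      simp only [List.length_nil] at hBinv
      have hv1 : ShapeOK m v1 := hBinv.1
      have hA : dirsA.foldl (stepA m c.1 c.2 s) (v, tagL s F' ++ tagL (s + 1) N) =
          (v1, (tagL s F' ++ tagL (s + 1) N) ++ new.map (fun c2 => (c2.1, c2.2, s + 1))) := by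
        rw [foldAB m c.1 c.2 s dirsA v (tagL s F' ++ tagL (s + 1) N), dirsA_map, hp]
      have hlist : (tagL s F' ++ tagL (s + 1) N) ++ new.map (fun c2 => (c2.1, c2.2, s + 1)) =
          tagL s F' ++ tagL (s + 1) (N ++ new) := by
        simp [tagL, List.map_append]
      have hcell : cellStepB m s (d, v, N) c =
          ((if cellGet m c.1 c.2 = "t" then d ++ [s] else d), v1, N ++ new) := by
        simp only [cellStepB]
        have happ := foldB_append m (nbrs c.1 c.2) v N []
        simp only [List.append_nil] at happ
        rw [happ, hp]
      have hfold : F'.foldl (cellStepB m s)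
            ((if cellGet m c.1 c.2 = "t" then d ++ [s] else d), v1, N ++ new) =
          (c :: F').foldl (cellStepB m s) (d, v, N) := by
        rw [List.foldl_cons, hcell]
      have hst' : ShapeOK m ((F'.foldl (cellStepB m s)
          ((if cellGet m c.1 c.2 = "t" then d ++ [s] else d), v1, N ++ new)).2.1) := by
        rw [hfold]; exact hst
      have hk' : 2 * unvis v1 + F'.length + 2 * (N ++ new).length ≤ k := by
        have := hBinv.2
        simp only [List.length_append, List.length_cons] at hk ⊢
        omega
      have ihh := ih F' (N ++ new) s v1 hv1
        (if cellGet m c.1 c.2 = "t" then d ++ [s] else d) hst' hk'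
      calc runA m (tagL s (c :: F') ++ tagL (s + 1) N) v hv d
          = runA m ((c.1, c.2, s) :: (tagL s F' ++ tagL (s + 1) N)) v hv d :=
            runA_congr m hv hv (by simp [tagL]) rfl rfl
        _ = runA m (dirsA.foldl (stepA m c.1 c.2 s) (v, tagL s F' ++ tagL (s + 1) N)).2
              (dirsA.foldl (stepA m c.1 c.2 s) (v, tagL s F' ++ tagL (s + 1) N)).1
              (foldA_inv m c.1 c.2 s dirsA v (tagL s F' ++ tagL (s + 1) N) hv).1
              (if cellGet m c.1 c.2 = "t" then d ++ [s] else d) :=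
            runA_cons m c.1 c.2 s (tagL s F' ++ tagL (s + 1) N) v hv d
        _ = runA m (tagL s F' ++ tagL (s + 1) (N ++ new)) v1 hv1
              (if cellGet m c.1 c.2 = "t" then d ++ [s] else d) :=
            runA_congr m _ hv1 (by rw [hA, hlist]) (by rw [hA]) rfl
        _ = runB m ((F'.foldl (cellStepB m s)
                ((if cellGet m c.1 c.2 = "t" then d ++ [s] else d), v1, N ++ new)).2.2) (s + 1)
              ((F'.foldl (cellStepB m s)
                ((if cellGet m c.1 c.2 = "t" then d ++ [s] else d), v1, N ++ new)).2.1) hst'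
              ((F'.foldl (cellStepB m s)
                ((if cellGet m c.1 c.2 = "t" then d ++ [s] else d), v1, N ++ new)).1) := ihh
        _ = runB m ((c :: F').foldl (cellStepB m s) (d, v, N)).2.2 (s + 1)
              ((c :: F').foldl (cellStepB m s) (d, v, N)).2.1 hst
              ((c :: F').foldl (cellStepB m s) (d, v, N)).1 :=
            runB_congr m hst' hst (by rw [hfold]) rfl (by rw [hfold]) (by rw [hfold])

theorem bfs_eq_alt (m : List (List String)) (x y : Int) : bfs m x y = bfs_alt m x y := by
  unfold bfs bfs_alt
  have key : ∀ (h1 h2 : ShapeOK m (List.replicate m.length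
      (List.replicate (m.getD 0 []).length false))),
      runA m [(x, y, 0)]
          (List.replicate m.length (List.replicate (m.getD 0 []).length false)) h1 [] =
        runB m [(x, y)] 0
          (List.replicate m.length (List.replicate (m.getD 0 []).length false)) h2 [] := by
    intro h1 h2
    have hst := (foldLevel_inv m 0 [(x, y)] []
      (List.replicate m.length (List.replicate (m.getD 0 []).length false)) [] h2).1
    have hb := bridge m
      (2 * unvis (List.replicate m.length (List.replicate (m.getD 0 []).length false)) + 3)
      [(x, y)] [] 0
      (List.replicate m.length (List.replicate (m.getD 0 []).length false)) h1 [] hst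
      (by simp)
    calc runA m [(x, y, 0)]
            (List.replicate m.length (List.replicate (m.getD 0 []).length false)) h1 []
        = runA m (tagL 0 [(x, y)] ++ tagL (0 + 1) [])
            (List.replicate m.length (List.replicate (m.getD 0 []).length false)) h1 [] :=
          runA_congr m h1 h1 (by simp [tagL]) rfl rfl
      _ = runB m (([(x, y)].foldl (cellStepB m 0) (([] : List Int),
              List.replicate m.length (List.replicate (m.getD 0 []).length false),
              ([] : List (Int × Int)))).2.2) (0 + 1)
            (([(x, y)].foldl (cellStepB m 0) (([] : List Int),
              List.replicate m.length (List.replicate (m.getD 0 []).length false),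
              ([] : List (Int × Int)))).2.1) hst
            (([(x, y)].foldl (cellStepB m 0) (([] : List Int),
              List.replicate m.length (List.replicate (m.getD 0 []).length false),
              ([] : List (Int × Int)))).1) := hb
      _ = runB m [(x, y)] 0
            (List.replicate m.length (List.replicate (m.getD 0 []).length false)) h2 [] :=
          (runB_cons m (x, y) [] 0
            (List.replicate m.length (List.replicate (m.getD 0 []).length false)) h2 []).symm
  rw [key]

theorem bfs_spec : Claim_equal_bfs := by
  intro m x y _ _
  unfold Spec_bfs
  exact bfs_eq_alt m x y
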